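-- pv_equiv track=rewrite | github.com/Nady-Emad/RansomShield | core/api_detector.py | _sequence_matches
-- ===== SOURCE A (Python) =====
-- def _sequence_matches(api_sequence, pattern):
--     """Check if API sequence contains pattern."""
--     if len(pattern) > len(api_sequence):
--         return False
--
--     # Sliding window search
--     for i in range(len(api_sequence) - len(pattern) + 1):
--         window = api_sequence[i:i+len(pattern)]
--
--         # Check if pattern matches (with gaps allowed)
--         pattern_idx = 0
--         for api in window:
--             if pattern_idx < len(pattern) and api == pattern[pattern_idx]:
--                 pattern_idx += 1
--
--         if pattern_idx == len(pattern):
--             return True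
--
--     return False
-- ===== SOURCE B (Python) =====
-- def _is_prefix_from(seq, pattern, i):
--     """True iff pattern occurs at position i of seq."""
--     if len(seq) - i < len(pattern):
--         return False
--     for k in range(len(pattern)):
--         if seq[i + k] != pattern[k]:
--             return False
--     return True
--
-- def _sequence_matches(api_sequence, pattern):
--     """Check if API sequence contains pattern."""
--     i = 0
--     while True:
--         if _is_prefix_from(api_sequence, pattern, i):
--             return True
--         if i >= len(api_sequence):
--             return False
--         i += 1
-- ===== Notes on version B (the rewrite author's own statement) =====
-- stated objective: simpler
-- what changed: A slides a window over the sequence and runs a greedy index-advancing counter over each window (which, because the window has the pattern's length, amounts to an equality test); B is a plain prefix-check-then-drop contiguous-sublist search with early exit on the first mismatch.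
import Mathlib
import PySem

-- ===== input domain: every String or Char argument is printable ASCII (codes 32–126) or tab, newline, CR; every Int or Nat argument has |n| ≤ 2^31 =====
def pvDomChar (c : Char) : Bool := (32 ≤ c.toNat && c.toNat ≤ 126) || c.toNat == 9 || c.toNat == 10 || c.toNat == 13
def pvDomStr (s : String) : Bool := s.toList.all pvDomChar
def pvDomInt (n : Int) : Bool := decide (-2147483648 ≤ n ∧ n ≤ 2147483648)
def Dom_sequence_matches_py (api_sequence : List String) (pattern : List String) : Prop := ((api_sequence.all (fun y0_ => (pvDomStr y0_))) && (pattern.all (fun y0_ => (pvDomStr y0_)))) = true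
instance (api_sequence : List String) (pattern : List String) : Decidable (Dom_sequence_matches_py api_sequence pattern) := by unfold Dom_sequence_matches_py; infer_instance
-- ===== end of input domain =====

-- B replaces A's window-plus-greedy-counter scan by a plain occurs-at-position-i prefix check advanced by an index cursor; objective: simpler (same exact behaviour).


-- ===== PORT A =====
-- inner loop: 'pattern_idx = 0; for api in window: if pattern_idx < len(pattern) and api == pattern[pattern_idx]: pattern_idx += 1'
def seqA_idx (pattern : List String) (window : List String) : Int :=
  window.foldl
    (fun patternIdx api =>
      if patternIdx < (pattern.length : Int) ∧ PySem.List.pyGet? pattern patternIdx = some api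
      then patternIdx + 1 else patternIdx) 0

def sequence_matches_py (api_sequence : List String) (pattern : List String) : Bool :=
  if (pattern.length : Int) > (api_sequence.length : Int) then false
  else
    (PySem.List.pyRange 0 ((api_sequence.length : Int) - (pattern.length : Int) + 1) 1).any
      (fun i =>
        seqA_idx pattern (PySem.List.slice api_sequence (some i) (some (i + (pattern.length : Int))))
          == (pattern.length : Int))

-- ===== PORT B =====
-- '_is_prefix_from(seq, pattern, i)': length guard, then 'for k in range(len(pattern)): if seq[i+k] != pattern[k]: return False'
-- (the guard keeps every index in range, so pyGetD with a dummy default is exact here)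
def isPrefixFromB (seq : List String) (pattern : List String) (i : Nat) : Bool :=
  if (seq.length : Int) - (i : Int) < (pattern.length : Int) then false
  else (PySem.List.pyRange 0 (pattern.length : Int) 1).all
    (fun k => PySem.List.pyGetD seq ((i : Int) + k) "" == PySem.List.pyGetD pattern k "")

-- 'i = 0; while True: if _is_prefix_from(…, i): return True; if i >= len(api_sequence): return False; i += 1'
-- (i only ever grows from 0, so it is carried as a Nat)
def seqB_loop (seq : List String) (pattern : List String) (i : Nat) : Bool :=
  if isPrefixFromB seq pattern i then true
  else if seq.length ≤ i then false
  else seqB_loop seq pattern (i + 1)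
termination_by seq.length - i

def sequence_matches_py_alt (api_sequence : List String) (pattern : List String) : Bool :=
  seqB_loop api_sequence pattern 0

-- ===== PRECONDITION & SPEC =====
def Spec_sequence_matches_py (api_sequence : List String) (pattern : List String) (out : Bool) : Prop := out = sequence_matches_py_alt api_sequence pattern
instance (api_sequence : List String) (pattern : List String) (out : Bool) : Decidable (Spec_sequence_matches_py api_sequence pattern out) := by unfold Spec_sequence_matches_py; infer_instance

-- ===== CLAIM (what is proved, stated in full; the proofs are below) =====
def Claim_equal_sequence_matches_py : Prop := ∀ (api_sequence : List String) (pattern : List String), Dom_sequence_matches_py api_sequence pattern → Spec_sequence_matches_py api_sequence pattern (sequence_matches_py api_sequence pattern)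

-- ===== LEMMAS AND PROOFS =====

-- greedy subsequence-match count of A's inner loop, as a structural recursion
def gmatch : List String → List String → Nat
  | _, [] => 0
  | [], _ :: w => gmatch [] w
  | b :: q, a :: w => if a == b then gmatch q w + 1 else gmatch (b :: q) w

theorem gmatch_le_right (q w : List String) : gmatch q w ≤ w.length := by
  induction w generalizing q with
  | nil => simp [gmatch]
  | cons a w ih =>
    cases q with
    | nil => simp [gmatch]; exact Nat.le_succ_of_le (ih [])
    | cons b q' =>
      by_cases h : a == b <;> simp [gmatch, h]
      · exact ih q'
      · exact Nat.le_succ_of_le (ih (b :: q'))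

theorem gmatch_full_iff (q w : List String) (hl : w.length = q.length) :
    gmatch q w = q.length ↔ w = q := by
  induction w generalizing q with
  | nil =>
    cases q with
    | nil => simp [gmatch]
    | cons b q' => simp at hl
  | cons a w ih =>
    cases q with
    | nil => simp at hl
    | cons b q' =>
      simp at hl
      by_cases h : a == b
      · have hb : a = b := by simpa using h
        simp [gmatch, hb, ih q' hl]
      · have hb : ¬ a = b := by simpa using h
        have hle := gmatch_le_right (b :: q') w
        simp [gmatch, h, hb]
        omega

-- A's inner fold computes the greedy count
theorem seqA_fold (p w : List String) (k : Nat) (hk : k ≤ p.length) :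
    w.foldl
      (fun patternIdx api =>
        if patternIdx < (p.length : Int) ∧ PySem.List.pyGet? p patternIdx = some api
        then patternIdx + 1 else patternIdx) (k : Int)
      = (k : Int) + gmatch (p.drop k) w := by
  induction w generalizing k with
  | nil => simp [gmatch]
  | cons a w ih =>
    by_cases hlt : k < p.length
    · have hget : PySem.List.pyGet? p (k : Int) = p[k]? := PySem.List.pyGet?_natCast p k
      have hdk : p.drop k = p[k] :: p.drop (k + 1) := List.drop_eq_getElem_cons hlt
      by_cases he : p[k] = a
      · have hc : ((k : Int) < (p.length : Int) ∧ PySem.List.pyGet? p (k : Int) = some a) := by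
          constructor
          · exact_mod_cast hlt
          · rw [hget, List.getElem?_eq_getElem hlt, he]
        simp only [List.foldl_cons, if_pos hc]
        have h1 : ((k : Int) + 1) = ((k + 1 : Nat) : Int) := by push_cast; ring
        rw [h1, ih (k + 1) hlt, hdk]
        have hab : (a == p[k]) = true := by simp [he]
        simp [gmatch, hab]
        ring
      · have hne : ¬ ((k : Int) < (p.length : Int) ∧ PySem.List.pyGet? p (k : Int) = some a) := by
          rintro ⟨-, hc⟩
          rw [hget, List.getElem?_eq_getElem hlt] at hc
          exact he (by simpa using hc)
        simp only [List.foldl_cons, if_neg hne]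
        rw [ih k hk, hdk]
        have hab : (a == p[k]) = false := by
          simp
          exact fun h => he h.symm
        simp [gmatch, hab]
    · have hk' : k = p.length := by omega
      have hd : p.drop k = [] := by simp [hk']
      have hne : ¬ ((k : Int) < (p.length : Int) ∧ PySem.List.pyGet? p (k : Int) = some a) := by
        rintro ⟨hc, -⟩; exact hlt (by exact_mod_cast hc)
      simp only [List.foldl_cons, if_neg hne]
      rw [ih k hk]
      simp [hd, gmatch]

theorem seqA_idx_eq (p w : List String) : seqA_idx p w = (gmatch p w : Int) := by
  have := seqA_fold p w 0 (Nat.zero_le _)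
  simpa [seqA_idx] using this

-- B's guard decides "pattern is a prefix of the i-th suffix"
theorem isPrefixFromB_iff (seq p : List String) (i : Nat) (hi : i ≤ seq.length) :
    isPrefixFromB seq p i = true ↔ p <+: seq.drop i := by
  unfold isPrefixFromB
  by_cases hg : (seq.length : Int) - (i : Int) < (p.length : Int)
  · rw [if_pos hg]
    simp only [Bool.false_eq_true, false_iff]
    intro hc
    have := hc.length_le
    simp at this
    omega
  · rw [if_neg hg]
    have him : i + p.length ≤ seq.length := by omega
    rw [PySem.List.pyRange_one]
    have hmn : (((p.length : Int)) - 0).toNat = p.length := by omega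
    rw [hmn]
    simp only [List.all_map, List.all_eq_true, List.mem_range, Function.comp]
    constructor
    · intro hall
      rw [List.prefix_iff_eq_take]
      apply List.ext_getElem
      · simp; omega
      · intro k hk1 hk2
        have hkm : k < p.length := hk1
        have hthis := hall k hkm
        simp only [zero_add] at hthis
        rw [show (i : Int) + (k : Int) = ((i + k : Nat) : Int) by push_cast; ring] at hthis
        rw [PySem.List.pyGetD_natCast, PySem.List.pyGetD_natCast] at hthis
        have hik : i + k < seq.length := by omega
        rw [List.getD_eq_getElem _ _ hik, List.getD_eq_getElem _ _ hkm] at hthis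
        have heq : seq[i + k] = p[k] := by simpa using hthis
        simp [List.getElem_take, List.getElem_drop, heq]
    · intro hpre k hkm
      have hik : i + k < seq.length := by omega
      have hpq : p[k]? = seq[i + k]? := by
        rw [List.prefix_iff_eq_take] at hpre
        conv_lhs => rw [hpre]
        simp [List.getElem?_drop, hkm]
      simp only [zero_add]
      rw [show (i : Int) + (k : Int) = ((i + k : Nat) : Int) by push_cast; ring,
        PySem.List.pyGetD_natCast, PySem.List.pyGetD_natCast]
      rw [List.getD_eq_getElem _ _ hik, List.getD_eq_getElem _ _ hkm]
      rw [List.getElem?_eq_getElem hik, List.getElem?_eq_getElem hkm] at hpq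
      simp at hpq
      simp [hpq]

-- the whole of B decides "pattern is an infix of the i-th suffix"
theorem seqB_loop_iff (seq p : List String) (i : Nat) (hi : i ≤ seq.length) :
    seqB_loop seq p i = true ↔ p <:+: seq.drop i := by
  generalize hn : seq.length - i = n
  induction n generalizing i with
  | zero =>
    have hie : i = seq.length := by omega
    rw [seqB_loop]
    by_cases hp : isPrefixFromB seq p i = true
    · rw [if_pos hp]
      simp only [true_iff]
      exact ((isPrefixFromB_iff seq p i hi).1 hp).isInfix
    · rw [if_neg hp, if_pos (by omega)]
      simp only [Bool.false_eq_true, false_iff]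
      intro hc
      exact hp ((isPrefixFromB_iff seq p i hi).2 (by
        rcases (by simpa [hie] using hc : p = []) with rfl
        exact List.nil_prefix))
  | succ n ihn =>
    have hlt : i < seq.length := by omega
    rw [seqB_loop]
    by_cases hp : isPrefixFromB seq p i = true
    · rw [if_pos hp]
      simp only [true_iff]
      exact ((isPrefixFromB_iff seq p i hi).1 hp).isInfix
    · rw [if_neg hp, if_neg (by omega)]
      rw [ihn (i + 1) (by omega) (by omega)]
      have hdk : seq.drop i = seq[i] :: seq.drop (i + 1) := List.drop_eq_getElem_cons hlt
      rw [hdk, List.infix_cons_iff]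
      constructor
      · exact Or.inr
      · rintro (hc | hc)
        · exact absurd ((isPrefixFromB_iff seq p i hi).2 (hdk ▸ hc)) hp
        · exact hc

theorem altB_iff (s p : List String) : sequence_matches_py_alt s p = true ↔ p <:+: s := by
  have := seqB_loop_iff s p 0 (Nat.zero_le _)
  simpa [sequence_matches_py_alt] using this

-- A decides the infix relation too
theorem seqA_iff (s p : List String) : sequence_matches_py s p = true ↔ p <:+: s := by
  unfold sequence_matches_py
  by_cases hlen : (p.length : Int) > (s.length : Int)
  · rw [if_pos hlen]
    simp only [Bool.false_eq_true, false_iff]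
    intro h
    have := h.length_le
    omega
  · rw [if_neg hlen]
    rw [List.any_eq_true]
    constructor
    · rintro ⟨i, hi, hcheck⟩
      rw [PySem.List.mem_pyRange_one] at hi
      obtain ⟨h0, h1⟩ := hi
      have hslice : PySem.List.slice s (some i) (some (i + (p.length : Int)))
          = (s.drop i.toNat).take p.length := by
        rw [PySem.List.slice_toNat s h0 (by omega)]
        congr 1
        omega
      have hwl : ((s.drop i.toNat).take p.length).length = p.length := by
        simp
        omega
      rw [hslice] at hcheck
      simp only [seqA_idx_eq, beq_iff_eq, Nat.cast_inj] at hcheck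
      have hwp := (gmatch_full_iff p _ hwl).1 hcheck
      exact List.infix_iff_prefix_suffix.2
        ⟨s.drop i.toNat, hwp ▸ List.take_prefix _ _, List.drop_suffix _ _⟩
    · intro h
      obtain ⟨u, v, huv⟩ := h
      have hs : s.length = u.length + p.length + v.length := by
        rw [← huv]; simp; omega
      refine ⟨(u.length : Int), ?_, ?_⟩
      · rw [PySem.List.mem_pyRange_one]
        constructor
        · positivity
        · omega
      · show (seqA_idx p (PySem.List.slice s (some ((u.length : Int)))
            (some ((u.length : Int) + (p.length : Int)))) == ((p.length : Int))) = true
        have hsl : PySem.List.slice s (some ((u.length : Int)))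
            (some ((u.length : Int) + (p.length : Int))) = p := by
          rw [PySem.List.slice_natCast_add, ← huv, List.append_assoc, List.drop_left,
            List.take_left]
        rw [hsl, seqA_idx_eq]
        have hg : gmatch p p = p.length := (gmatch_full_iff p p rfl).2 rfl
        simp [hg]

-- ===== VERDICT (by name: the statement is the Claim_ definition above) =====
theorem sequence_matches_py_spec : Claim_equal_sequence_matches_py := by
  intro s p _
  unfold Spec_sequence_matches_py
  rw [Bool.eq_iff_iff, seqA_iff, altB_iff]
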